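-- pv_equiv track=rewrite | github.com/CUUP1DON/TS4-Creator-Tools | pi_bone_shape_destroyer.py | is_bone_shape_object
-- ===== SOURCE A (Python) =====
-- def is_bone_shape_object(name):
--     """Check if an object name matches bone shape patterns"""
--     name_lower = name.lower()
--
--     # Check for exact matches or numbered variations
--     base_names = ['bone_shape', 'bone_bone_shape']
--
--     for base_name in base_names:
--         if name_lower == base_name:
--             return True
--         # Check for numbered variations like .001, .002, etc.
--         if name_lower.startswith(base_name + '.'):
--             suffix = name_lower[len(base_name + '.'):]
--             if suffix.isdigit():
--                 return True
--
--     return False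
-- ===== SOURCE B (Python) =====
-- def is_bone_shape_object(name):
--     """Check if an object name matches bone shape patterns"""
--     bases = ('bone_shape', 'bone_bone_shape')
--     nl = name.lower()
--     if nl in bases:
--         return True
--     i = nl.rfind('.')
--     if i == -1:
--         return False
--     return nl[i + 1:].isdigit() and nl[:i] in bases
-- ===== Notes on version B (the rewrite author's own statement) =====
-- stated objective: simpler
-- what changed: Instead of looping over each base name and testing an equality plus a startswith+suffix slice per base, B parses the name once: direct membership in the base tuple, then a single rfind of the dot separator splitting the name into head/tail, with a tail isdigit test and a head membership.
import Mathlib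
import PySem

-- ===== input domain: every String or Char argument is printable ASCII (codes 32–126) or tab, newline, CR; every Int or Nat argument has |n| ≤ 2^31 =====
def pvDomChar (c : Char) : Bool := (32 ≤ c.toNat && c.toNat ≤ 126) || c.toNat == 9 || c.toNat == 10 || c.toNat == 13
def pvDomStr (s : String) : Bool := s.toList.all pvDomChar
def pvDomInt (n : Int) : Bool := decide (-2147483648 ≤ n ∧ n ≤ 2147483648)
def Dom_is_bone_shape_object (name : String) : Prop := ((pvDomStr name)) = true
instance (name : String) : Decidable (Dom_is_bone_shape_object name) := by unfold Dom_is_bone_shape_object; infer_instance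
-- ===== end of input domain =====

-- B replaces A's per-base loop of equality/startswith/slice tests by a single parse:
-- direct membership, then one rfind of the dot splitting into head/tail with an isdigit tail and a head membership (objective: simpler).

-- ===== PORT A =====
-- the for-loop over base_names, with both early returns, step for step
def pvLoopA (nl : List Char) : List (List Char) → Bool
  | [] => false
  | b :: rest =>
    if nl = b then true
    else if PySem.Chars.startswith nl (b ++ ['.']) then
      if PySem.Chars.strIsdigit (PySem.Chars.slice nl (some ((b ++ ['.']).length : Int)) none) then
        true
      else pvLoopA nl rest
    else pvLoopA nl rest

def is_bone_shape_object (name : String) : Bool :=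
  pvLoopA (PySem.Chars.lower name.toList) ["bone_shape".toList, "bone_bone_shape".toList]

-- ===== PORT B =====
def pvBases : List (List Char) := ["bone_shape".toList, "bone_bone_shape".toList]

def is_bone_shape_object_alt (name : String) : Bool :=
  let nl := PySem.Chars.lower name.toList
  if pvBases.contains nl then true
  else
    let i := PySem.Chars.rfind nl ['.']
    if i = -1 then false
    else
      PySem.Chars.strIsdigit (PySem.Chars.slice nl (some (i + 1)) none)
        && pvBases.contains (PySem.Chars.slice nl none (some i))

-- ===== PRECONDITION & SPEC =====
def Spec_is_bone_shape_object (name : String) (out : Bool) : Prop := out = is_bone_shape_object_alt name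
instance (name : String) (out : Bool) : Decidable (Spec_is_bone_shape_object name out) := by unfold Spec_is_bone_shape_object; infer_instance

-- ===== CLAIM (what is proved, stated in full; the proofs are below) =====
def Claim_equal_is_bone_shape_object : Prop := ∀ (name : String), Dom_is_bone_shape_object name → Spec_is_bone_shape_object name (is_bone_shape_object name)

-- ===== LEMMAS AND PROOFS =====

-- the common characterisation: nl is a base, or base ++ '.' ++ a nonempty digit string
def pvMid (nl : List Char) : Prop :=
  nl ∈ pvBases ∨ ∃ b s, b ∈ pvBases ∧ s ≠ [] ∧ (∀ c ∈ s, PySem.Chars.isdigit c) ∧ nl = b ++ '.' :: s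


lemma pvSwd (nl b : List Char) :
    (PySem.Chars.startswith nl (b ++ ['.']) = true ∧
      PySem.Chars.strIsdigit (PySem.Chars.slice nl (some ((b ++ ['.']).length : Int)) none) = true)
      ↔ ∃ s, s ≠ [] ∧ (∀ c ∈ s, PySem.Chars.isdigit c) ∧ nl = b ++ '.' :: s := by
  rw [PySem.Chars.startswith_iff]
  have hsl : PySem.Chars.slice nl (some ((b ++ ['.']).length : Int)) none
      = nl.drop (b ++ ['.']).length := by
    rw [PySem.Chars.slice_eq_listSlice, PySem.List.slice_from nl (Int.natCast_nonneg _),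
      Int.toNat_natCast]
  rw [hsl]
  constructor
  · rintro ⟨⟨t, rfl⟩, hd⟩
    rw [List.drop_left' rfl] at hd
    simp [PySem.Chars.strIsdigit] at hd
    exact ⟨t, hd.1, hd.2, by simp⟩
  · rintro ⟨s, hne, hdig, rfl⟩
    refine ⟨⟨s, by simp⟩, ?_⟩
    rw [show b ++ '.' :: s = (b ++ ['.']) ++ s from by simp, List.drop_left' rfl]
    simp only [PySem.Chars.strIsdigit, List.all_eq_true, Bool.and_eq_true, Bool.not_eq_eq_eq_not,
      Bool.not_true, List.isEmpty_eq_false_iff]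
    exact ⟨hne, hdig⟩

lemma pvLoopA_cons (nl b : List Char) (rest : List (List Char)) :
    pvLoopA nl (b :: rest) = true ↔
      nl = b ∨ (PySem.Chars.startswith nl (b ++ ['.']) = true ∧
        PySem.Chars.strIsdigit (PySem.Chars.slice nl (some ((b ++ ['.']).length : Int)) none) = true)
      ∨ pvLoopA nl rest = true := by
  simp only [pvLoopA]
  split_ifs with h1 h2 h3 <;> simp_all

lemma pvA_iff (nl : List Char) : pvLoopA nl pvBases = true ↔ pvMid nl := by
  have e : pvBases = ["bone_shape".toList, "bone_bone_shape".toList] := rfl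
  rw [pvMid, e]
  rw [pvLoopA_cons, pvLoopA_cons, pvSwd, pvSwd]
  constructor
  · rintro (h | ⟨s, hs⟩ | h | ⟨s, hs⟩ | h)
    · exact Or.inl (by simp [h])
    · exact Or.inr ⟨_, s, by simp, hs.1, hs.2.1, hs.2.2⟩
    · exact Or.inl (by simp [h])
    · exact Or.inr ⟨_, s, by simp, hs.1, hs.2.1, hs.2.2⟩
    · simp [pvLoopA] at h
  · rintro (h | ⟨b, s, hb, hs⟩)
    · simp only [List.mem_cons, List.not_mem_nil, or_false] at h
      rcases h with h | h
      · exact Or.inl h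
      · exact Or.inr (Or.inr (Or.inl h))
    · simp only [List.mem_cons, List.not_mem_nil, or_false] at hb
      rcases hb with rfl | rfl
      · exact Or.inr (Or.inl ⟨s, hs⟩)
      · exact Or.inr (Or.inr (Or.inr (Or.inl ⟨s, hs⟩)))

lemma pvPfx (l : List Char) (j : Nat) :
    (['.'].isPrefixOf (l.drop j)) = true ↔ l[j]? = some '.' := by
  rw [List.isPrefixOf_iff_prefix, ← List.head?_drop]
  generalize l.drop j = t
  cases t with
  | nil => simp
  | cons a t => simp [List.cons_prefix_cons, eq_comm]

lemma pvGo_spec (s : List Char) (k : Nat) :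
    (PySem.Chars.rfind.go s ['.'] k = -1 ∧ ∀ j ≤ k, s[j]? ≠ some '.') ∨
    (∃ j ≤ k, PySem.Chars.rfind.go s ['.'] k = (j : Int) ∧ s[j]? = some '.' ∧
      ∀ m, j < m → m ≤ k → s[m]? ≠ some '.') := by
  induction k with
  | zero =>
    by_cases h : s[0]? = some '.'
    · have hp : ['.'].isPrefixOf s = true := by
        have := (pvPfx s 0).2 h; simpa using this
      right
      exact ⟨0, le_refl _, by simp [PySem.Chars.rfind.go, hp], h,
        fun m hm hm' => absurd (hm.trans_le hm') (lt_irrefl 0)⟩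
    · have hp : ['.'].isPrefixOf s = false := by
        rw [Bool.eq_false_iff]; intro hc
        exact h ((pvPfx s 0).1 (by simpa using hc))
      left
      refine ⟨by simp [PySem.Chars.rfind.go, hp], fun j hj => ?_⟩
      interval_cases j; exact h
  | succ n ih =>
    by_cases h : s[n+1]? = some '.'
    · right
      have hp : ['.'].isPrefixOf (s.drop (n+1)) = true := (pvPfx s (n+1)).2 h
      exact ⟨n+1, le_refl _, by simp [PySem.Chars.rfind.go, hp], h,
        fun m hm hm' => absurd (Nat.lt_of_lt_of_le hm hm') (lt_irrefl _)⟩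
    · have hpf : (['.'].isPrefixOf (s.drop (n+1))) = false := by
        rw [Bool.eq_false_iff]
        intro hc
        exact h ((pvPfx s (n+1)).1 hc)
      have hgo : PySem.Chars.rfind.go s ['.'] (n+1) = PySem.Chars.rfind.go s ['.'] n := by
        simp [PySem.Chars.rfind.go, hpf]
      rcases ih with ⟨h1, h2⟩ | ⟨j, hj, hval, hdot, hmax⟩
      · left
        refine ⟨hgo.trans h1, fun j hjk => ?_⟩
        rcases Nat.lt_or_ge j (n+1) with hlt | hge
        · exact h2 j (Nat.lt_succ_iff.1 hlt)
        · have : j = n+1 := le_antisymm hjk hge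
          rw [this]; exact h
      · right
        refine ⟨j, Nat.le_succ_of_le hj, hgo.trans hval, hdot, fun m hm hmk => ?_⟩
        rcases Nat.lt_or_ge m (n+1) with hlt | hge
        · exact hmax m hm (Nat.lt_succ_iff.1 hlt)
        · have : m = n+1 := le_antisymm hmk hge
          rw [this]; exact h

lemma pvDotAt (b s : List Char) : (b ++ '.' :: s)[b.length]? = some '.' := by
  rw [List.getElem?_append_right (le_refl _)]
  simp

lemma pvDotAfter (b s : List Char) (hdig : ∀ c ∈ s, PySem.Chars.isdigit c = true)
    (m : Nat) (hm : b.length < m) : (b ++ '.' :: s)[m]? ≠ some '.' := by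
  intro h
  rw [List.getElem?_append_right (Nat.le_of_lt hm)] at h
  obtain ⟨d, hd⟩ : ∃ d, m - b.length = d + 1 := ⟨m - b.length - 1, by omega⟩
  rw [hd, List.getElem?_cons_succ] at h
  have := hdig _ (List.mem_of_getElem? h)
  simp [PySem.Chars.isdigit] at this

lemma pvB_iff (nl : List Char) :
    (if pvBases.contains nl then true
     else if PySem.Chars.rfind nl ['.'] = -1 then false
     else
       PySem.Chars.strIsdigit
           (PySem.Chars.slice nl (some (PySem.Chars.rfind nl ['.'] + 1)) none)
         && pvBases.contains (PySem.Chars.slice nl none (some (PySem.Chars.rfind nl ['.'])))) = true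
      ↔ pvMid nl := by
  by_cases hc : pvBases.contains nl = true
  · rw [if_pos hc]
    exact ⟨fun _ => Or.inl (List.contains_iff_mem.1 hc), fun _ => rfl⟩
  · rw [if_neg hc]
    have hnm : nl ∉ pvBases := fun hm => hc (List.contains_iff_mem.2 hm)
    rcases pvGo_spec nl nl.length with ⟨h1, h2⟩ | ⟨j, hj, hval, hdot, hmax⟩
    · have hrf : PySem.Chars.rfind nl ['.'] = -1 := h1
      rw [hrf, if_pos rfl]
      simp only [Bool.false_eq_true, false_iff]
      rintro (hm | ⟨b, s, hb, hne, hdig, rfl⟩)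
      · exact hnm hm
      · exact h2 b.length (by simp [List.length_append]) (pvDotAt b s)
    · have hrf : PySem.Chars.rfind nl ['.'] = (j : Int) := hval
      have hjlt : j < nl.length := (List.getElem?_eq_some_iff.1 hdot).1
      have hnlj : nl[j] = '.' := (List.getElem?_eq_some_iff.1 hdot).2
      have hdrop : PySem.Chars.slice nl (some ((j : Int) + 1)) none = nl.drop (j + 1) := by
        rw [PySem.Chars.slice_eq_listSlice, show ((j : Int) + 1) = ((j + 1 : Nat) : Int) by push_cast; ring,
          PySem.List.slice_from nl (Int.natCast_nonneg _), Int.toNat_natCast]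
      have htake : PySem.Chars.slice nl none (some (j : Int)) = nl.take j := by
        rw [PySem.Chars.slice_eq_listSlice, PySem.List.slice_to nl (Int.natCast_nonneg _),
          Int.toNat_natCast]
      rw [hrf, if_neg (by omega : ¬((j : Int) = -1)), hdrop, htake]
      constructor
      · intro hlhs
        simp only [Bool.and_eq_true] at hlhs
        obtain ⟨hd, hcont⟩ := hlhs
        have hdec : nl = nl.take j ++ '.' :: nl.drop (j + 1) := by
          conv_lhs => rw [← List.take_append_drop j nl]
          rw [List.drop_eq_getElem_cons hjlt, hnlj]
        simp only [PySem.Chars.strIsdigit, Bool.and_eq_true, List.all_eq_true,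
          Bool.not_eq_eq_eq_not, Bool.not_true, List.isEmpty_eq_false_iff] at hd
        exact Or.inr ⟨nl.take j, nl.drop (j + 1), List.contains_iff_mem.1 hcont, hd.1, hd.2, hdec⟩
      · rintro (hm | ⟨b, s, hb, hne, hdig, hnl⟩)
        · exact absurd hm hnm
        · subst hnl
          have hJ : j = b.length := by
            rcases Nat.lt_trichotomy j b.length with hlt | heq | hgt
            · exact absurd (pvDotAt b s)
                (hmax b.length hlt (by simp [List.length_append]))
            · exact heq
            · exact absurd hdot (pvDotAfter b s hdig j hgt)
          subst hJ
          have ht : (b ++ '.' :: s).take b.length = b := List.take_left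
          have hdr : (b ++ '.' :: s).drop (b.length + 1) = s := by
            rw [show b ++ '.' :: s = (b ++ ['.']) ++ s by simp]
            exact List.drop_left' (by simp)
          rw [ht, hdr]
          simp only [PySem.Chars.strIsdigit, Bool.and_eq_true, List.all_eq_true,
            Bool.not_eq_eq_eq_not, Bool.not_true, List.isEmpty_eq_false_iff]
          exact ⟨⟨hne, hdig⟩, List.contains_iff_mem.2 hb⟩
-- ===== VERDICT (by name: the statement is the Claim_ definition above) =====
theorem is_bone_shape_object_spec : Claim_equal_is_bone_shape_object := by
  intro name _
  unfold Spec_is_bone_shape_object is_bone_shape_object is_bone_shape_object_alt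
  rw [Bool.eq_iff_iff]
  exact (pvA_iff _).trans (pvB_iff _).symm
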